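-- pv_equiv track=rewrite | github.com/Rheddes/advent-of-code-2022 | src/day10/cpu_cycles.py | get_register_values
-- ===== SOURCE A (Python) =====
-- def get_register_values(operations):
--     register_values = [1]
--     for op in operations:
--         register_values.append(register_values[-1])
--         if op.startswith('addx'):
--             [_, delta] = op.split(' ')
--             register_values.append(register_values[-1] + int(delta))
--     return register_values
-- ===== SOURCE B (Python) =====
-- def get_register_values(operations):
--     # Pass 1: flatten the instructions into per-cycle increments.
--     deltas = []
--     for op in operations:
--         deltas.append(0)
--         if op.startswith('addx'):
--             [_, delta] = op.split(' ')
--             deltas.append(int(delta))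
--     # Pass 2: running prefix sum starting from 1.
--     total = 1
--     result = [total]
--     for d in deltas:
--         total += d
--         result.append(total)
--     return result
-- ===== Notes on version B (the rewrite author's own statement) =====
-- stated objective: alternative
-- what changed: B separates the work into two passes: it first flattens the instructions into a list of per-cycle increments, then produces the answer as a running prefix sum over that list with a scalar accumulator, instead of A's single loop that repeatedly re-reads the tail of the growing output list.
import Mathlib
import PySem

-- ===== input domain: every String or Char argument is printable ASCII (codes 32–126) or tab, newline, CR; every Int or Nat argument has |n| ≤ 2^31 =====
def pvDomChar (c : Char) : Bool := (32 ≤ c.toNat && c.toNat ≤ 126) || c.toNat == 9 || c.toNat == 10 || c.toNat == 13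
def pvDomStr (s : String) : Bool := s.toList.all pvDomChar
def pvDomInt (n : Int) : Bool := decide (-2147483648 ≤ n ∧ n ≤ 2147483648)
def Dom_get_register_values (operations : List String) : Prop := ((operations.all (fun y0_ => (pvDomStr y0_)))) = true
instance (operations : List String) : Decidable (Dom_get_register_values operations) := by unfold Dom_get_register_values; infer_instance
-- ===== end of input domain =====

-- B re-decomposes A's single append loop into a per-cycle-increments pass followed by a prefix-sum pass
-- (objective: alternative); equal return value proved on Pre_ (inputs where A's split/int() do not raise).

-- ===== PORT A =====
-- one iteration of A's loop body (rv is register_values; raise points return rv unchanged, excluded by Pre_)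
def stepA_get_register_values (rv : List Int) (op : String) : List Int :=
  let rv1 := rv ++ [(PySem.List.pyGet? rv (-1)).getD 0]
  if PySem.Str.startswith op "addx" then
    match PySem.Str.split? op " " with
    | some [_, delta] =>
      match PySem.Int.ofStr? delta with
      | some d => rv1 ++ [(PySem.List.pyGet? rv1 (-1)).getD 0 + d]
      | none => rv1      -- int(delta) raises ValueError: outside Pre_
    | _ => rv1           -- unpacking [_, delta] raises ValueError: outside Pre_
  else rv1

def get_register_values (operations : List String) : List Int :=
  operations.foldl stepA_get_register_values [1]

-- ===== PORT B =====
-- one iteration of B's first loop (building deltas)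
def stepD_get_register_values (ds : List Int) (op : String) : List Int :=
  let ds1 := ds ++ [0]
  if PySem.Str.startswith op "addx" then
    match PySem.Str.split? op " " with
    | some [_, delta] =>
      match PySem.Int.ofStr? delta with
      | some d => ds1 ++ [d]
      | none => ds1      -- ValueError: outside Pre_
    | _ => ds1           -- ValueError: outside Pre_
  else ds1

-- one iteration of B's second loop (prefix sum); state = (total, result)
def stepS_get_register_values (st : Int × List Int) (d : Int) : Int × List Int :=
  (st.1 + d, st.2 ++ [st.1 + d])

def get_register_values_alt (operations : List String) : List Int :=
  ((operations.foldl stepD_get_register_values []).foldl stepS_get_register_values (1, [1])).2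

-- ===== PRECONDITION & SPEC =====
-- Pre_ excludes exactly the inputs on which A raises ValueError: an op starting with 'addx'
-- whose split(' ') is not exactly two pieces or whose second piece is not int()-parsable.
def Pre_get_register_values (operations : List String) : Prop :=
  (operations.all (fun op =>
    !PySem.Str.startswith op "addx" ||
    (match PySem.Str.split? op " " with
     | some [_, delta] => (PySem.Int.ofStr? delta).isSome
     | _ => false))) = true
instance (operations : List String) : Decidable (Pre_get_register_values operations) := by
  unfold Pre_get_register_values; infer_instance

def pvWitness_get_register_values : List String := ["noop", "addx 3", "addx -5"]

def Spec_get_register_values (operations : List String) (out : List Int) : Prop := out = get_register_values_alt operations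
instance (operations : List String) (out : List Int) : Decidable (Spec_get_register_values operations out) := by unfold Spec_get_register_values; infer_instance

-- ===== CLAIM (what is proved, stated in full; the proofs are below) =====
def Claim_equal_get_register_values : Prop := ∀ (operations : List String), Dom_get_register_values operations → Pre_get_register_values operations → Spec_get_register_values operations (get_register_values operations)

-- ===== LEMMAS AND PROOFS =====

-- the per-op increment list B's first pass appends for one op
def incs_get_register_values (op : String) : List Int :=
  if PySem.Str.startswith op "addx" then
    match PySem.Str.split? op " " with
    | some [_, delta] =>
      match PySem.Int.ofStr? delta with
      | some d => [0, d]
      | none => [0]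
    | _ => [0]
  else [0]

-- the tail (after the initial value) of a prefix sum starting at t
def tailScan_get_register_values (t : Int) : List Int → List Int
  | [] => []
  | d :: ds => (t + d) :: tailScan_get_register_values (t + d) ds

lemma pyGet_last (rv : List Int) (t : Int) :
    PySem.List.pyGet? (rv ++ [t]) (-1) = some t := by
  simp [PySem.List.pyGet?, PySem.List.pyIdx?]

lemma stepD_eq_append (ds : List Int) (op : String) :
    stepD_get_register_values ds op = ds ++ incs_get_register_values op := by
  unfold stepD_get_register_values incs_get_register_values
  split_ifs with h
  · cases hs : PySem.Str.split? op " " with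
    | none => simp
    | some parts =>
      match parts with
      | [] => simp
      | [_] => simp
      | [_, delta] => cases ho : PySem.Int.ofStr? delta <;> simp [ho]
      | _ :: _ :: _ :: _ => simp
  · simp

lemma deltas_eq_flatMap (operations : List String) :
    operations.foldl stepD_get_register_values [] =
      operations.flatMap incs_get_register_values := by
  have h := PySem.List.foldl_append_eq_flatMap incs_get_register_values operations []
  calc operations.foldl stepD_get_register_values []
      = operations.foldl (fun acc x => acc ++ incs_get_register_values x) [] := by
        exact PySem.List.foldl_congr_mem operations _ _ [] (fun acc x _ => stepD_eq_append acc x)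
    _ = operations.flatMap incs_get_register_values := by simpa using h

lemma scan_spec (ds : List Int) : ∀ (t : Int) (res : List Int),
    ds.foldl stepS_get_register_values (t, res) =
      (t + ds.sum, res ++ tailScan_get_register_values t ds) := by
  induction ds with
  | nil => intro t res; simp [tailScan_get_register_values]
  | cons d ds ih =>
    intro t res
    simp only [List.foldl_cons, stepS_get_register_values, tailScan_get_register_values, ih,
      List.sum_cons, List.append_assoc]
    simp [add_assoc]

lemma foldA_spec (operations : List String) (hpre : Pre_get_register_values operations) :
    ∀ (rv : List Int) (t : Int),
      operations.foldl stepA_get_register_values (rv ++ [t]) =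
        rv ++ [t] ++ tailScan_get_register_values t
          (operations.flatMap incs_get_register_values) := by
  induction operations with
  | nil => intro rv t; simp [tailScan_get_register_values]
  | cons op ops ih =>
    intro rv t
    unfold Pre_get_register_values at hpre
    rw [List.all_cons, Bool.and_eq_true] at hpre
    obtain ⟨hop, hops⟩ := hpre
    have ih' := ih hops
    rw [List.foldl_cons, List.flatMap_cons]
    by_cases h : PySem.Str.startswith op "addx"
    · simp only [h, Bool.not_true, Bool.false_or] at hop
      cases hs : PySem.Str.split? op " " with
      | none => rw [hs] at hop; simp at hop
      | some parts =>
        rw [hs] at hop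
        rcases parts with _ | ⟨p1, _ | ⟨p2, _ | ⟨p3, rest⟩⟩⟩
        · simp at hop
        · simp at hop
        · -- exactly two pieces
          cases ho : PySem.Int.ofStr? p2 with
          | none => simp [ho] at hop
          | some d =>
            have hstep : stepA_get_register_values (rv ++ [t]) op
                = rv ++ [t] ++ [t] ++ [t + d] := by
              unfold stepA_get_register_values
              rw [pyGet_last]
              simp only [Option.getD_some, if_pos h, hs, ho]
              rw [pyGet_last]
              simp
            have hinc : incs_get_register_values op = [0, d] := by
              unfold incs_get_register_values
              rw [if_pos h, hs]
              simp [ho]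
            rw [hstep, hinc, ih' (rv ++ [t] ++ [t]) (t + d)]
            simp [tailScan_get_register_values]
        · simp at hop
    · have hstep : stepA_get_register_values (rv ++ [t]) op = rv ++ [t] ++ [t] := by
        unfold stepA_get_register_values
        rw [pyGet_last]
        simp only [Option.getD_some, if_neg h]
      have hinc : incs_get_register_values op = [0] := by
        unfold incs_get_register_values
        rw [if_neg h]
      rw [hstep, hinc, ih' (rv ++ [t]) t]
      simp [tailScan_get_register_values]

-- ===== VERDICT (by name: the statement is the Claim_ definition above) =====
theorem get_register_values_spec : Claim_equal_get_register_values := by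
  intro operations _hdom hpre
  unfold Spec_get_register_values get_register_values get_register_values_alt
  rw [deltas_eq_flatMap, scan_spec]
  have h := foldA_spec operations hpre [] 1
  simpa using h
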